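-- pv_equiv track=rewrite | github.com/kennethberg87/Woo-Analytics | utils/woocommerce_client.py | get_invoice_details
-- ===== SOURCE A (Python) =====
-- def get_invoice_details(meta_data):
--     """Extract invoice details from order meta data"""
--     invoice_details = {
--         'invoice_number': '',
--         'invoice_date': None,
--         'order_number': ''
--     }
--
--     for meta in meta_data:
--         if meta.get('key') == '_wcpdf_invoice_number':
--             invoice_details['invoice_number'] = meta.get('value', '')
--         elif meta.get('key') == '_wcpdf_invoice_date_formatted':
--             invoice_details['invoice_date'] = meta.get('value', '')
--         elif meta.get('key') == '_order_number_formatted':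
--             invoice_details['order_number'] = meta.get('value', '')
--
--     return invoice_details
-- ===== SOURCE B (Python) =====
-- def _last_value(meta_data, key, default):
--     """Scan from the end for the effective (last-written) occurrence of key."""
--     for m in reversed(meta_data):
--         if m.get('key') == key:
--             return m.get('value', '')
--     return default
--
--
-- def get_invoice_details(meta_data):
--     """Extract invoice details from order meta data (per-field backward search)."""
--     return {
--         'invoice_number': _last_value(meta_data, '_wcpdf_invoice_number', ''),
--         'invoice_date': _last_value(meta_data, '_wcpdf_invoice_date_formatted', None),
--         'order_number': _last_value(meta_data, '_order_number_formatted', ''),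
--     }
-- ===== Notes on version B (the rewrite author's own statement) =====
-- stated objective: alternative
-- what changed: Replaces A's single forward pass mutating a result dict via if/elif dispatch by three independent backward searches (one per field) that each return at the first match, exploiting that last occurrence forward = first occurrence backward; each field's default (including invoice_date's None) is the search's own fallback.
import Mathlib
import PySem

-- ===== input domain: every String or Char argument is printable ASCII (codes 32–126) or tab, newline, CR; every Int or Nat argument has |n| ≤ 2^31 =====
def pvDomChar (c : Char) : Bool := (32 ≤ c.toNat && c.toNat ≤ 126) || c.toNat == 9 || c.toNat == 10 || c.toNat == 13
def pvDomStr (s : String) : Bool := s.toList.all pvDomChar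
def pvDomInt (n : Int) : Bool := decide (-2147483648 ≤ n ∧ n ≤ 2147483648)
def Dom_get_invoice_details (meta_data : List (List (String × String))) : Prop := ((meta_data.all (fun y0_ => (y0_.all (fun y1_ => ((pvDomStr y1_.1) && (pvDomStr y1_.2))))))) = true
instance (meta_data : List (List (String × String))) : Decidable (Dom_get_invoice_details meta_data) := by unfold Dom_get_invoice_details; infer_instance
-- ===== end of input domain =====

-- B replaces A's single forward if/elif pass mutating a result dict by three independent
-- backward searches, one per field, each returning at its first match (= last occurrence).

-- ===== PORT A =====
def get_invoice_details (meta_data : List (List (String × String))) : List (String × Option String) :=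
  (meta_data.foldl
    (fun d m =>
      if PySem.Dict.get? (PySem.Dict.mk m) "key" = some "_wcpdf_invoice_number" then
        d.insert "invoice_number" (some (PySem.Dict.getD (PySem.Dict.mk m) "value" ""))
      else if PySem.Dict.get? (PySem.Dict.mk m) "key" = some "_wcpdf_invoice_date_formatted" then
        d.insert "invoice_date" (some (PySem.Dict.getD (PySem.Dict.mk m) "value" ""))
      else if PySem.Dict.get? (PySem.Dict.mk m) "key" = some "_order_number_formatted" then
        d.insert "order_number" (some (PySem.Dict.getD (PySem.Dict.mk m) "value" ""))
      else d)
    (PySem.Dict.mk [("invoice_number", some ""), ("invoice_date", none), ("order_number", some "")])).items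

-- ===== PORT B =====
-- Source B's _last_value: loop over the (already reversed) list, return at the first match, else default
def pvLastValue (l : List (List (String × String))) (k : String) (dflt : Option String) : Option String :=
  match l with
  | [] => dflt
  | m :: rest =>
    if PySem.Dict.get? (PySem.Dict.mk m) "key" = some k then
      some (PySem.Dict.getD (PySem.Dict.mk m) "value" "")
    else pvLastValue rest k dflt

def get_invoice_details_alt (meta_data : List (List (String × String))) : List (String × Option String) :=
  [("invoice_number", pvLastValue meta_data.reverse "_wcpdf_invoice_number" (some "")),
   ("invoice_date", pvLastValue meta_data.reverse "_wcpdf_invoice_date_formatted" none),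
   ("order_number", pvLastValue meta_data.reverse "_order_number_formatted" (some ""))]

-- ===== PRECONDITION & SPEC =====
def Spec_get_invoice_details (meta_data : List (List (String × String))) (out : List (String × Option String)) : Prop := out = get_invoice_details_alt meta_data
instance (meta_data : List (List (String × String))) (out : List (String × Option String)) : Decidable (Spec_get_invoice_details meta_data out) := by unfold Spec_get_invoice_details; infer_instance

-- ===== CLAIM (what is proved, stated in full; the proofs are below) =====
def Claim_equal_get_invoice_details : Prop := ∀ (meta_data : List (List (String × String))), Dom_get_invoice_details meta_data → Spec_get_invoice_details meta_data (get_invoice_details meta_data)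

-- ===== LEMMAS AND PROOFS =====

-- last-wins value of meta-key k over the list, threaded through an arbitrary start accumulator
def pvLastVal (l : List (List (String × String))) (k : String) (a : Option String) : Option String :=
  l.foldl
    (fun acc m =>
      if PySem.Dict.get? (PySem.Dict.mk m) "key" = some k then
        some (PySem.Dict.getD (PySem.Dict.mk m) "value" "")
      else acc) a

lemma pvLastVal_cons (x : List (String × String)) (xs : List (List (String × String)))
    (k : String) (a : Option String) :
    pvLastVal (x :: xs) k a
      = pvLastVal xs k
          (if PySem.Dict.get? (PySem.Dict.mk x) "key" = some k then
            some (PySem.Dict.getD (PySem.Dict.mk x) "value" "")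
          else a) := rfl

lemma pvLastVal_elim (l : List (List (String × String))) (k : String) (a : Option String) :
    pvLastVal l k a = (pvLastVal l k none).elim a some := by
  induction l generalizing a with
  | nil => simp [pvLastVal]
  | cons x xs ih =>
    rw [pvLastVal_cons, pvLastVal_cons]
    by_cases h : PySem.Dict.get? (PySem.Dict.mk x) "key" = some k
    · rw [if_pos h, if_pos h,
        ih (some (PySem.Dict.getD (PySem.Dict.mk x) "value" ""))]
      cases pvLastVal xs k none <;> rfl
    · rw [if_neg h, if_neg h]
      exact ih a

lemma pvLastValue_append (a b : List (List (String × String))) (k : String) (d : Option String) :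
    pvLastValue (a ++ b) k d = pvLastValue a k (pvLastValue b k d) := by
  induction a with
  | nil => rfl
  | cons x xs ih =>
    simp only [List.cons_append, pvLastValue]
    rw [ih]

-- first match scanning backward = last-wins forward
lemma pvLastValue_reverse (l : List (List (String × String))) (k : String) (d : Option String) :
    pvLastValue l.reverse k d = (pvLastVal l k none).elim d some := by
  induction l generalizing d with
  | nil => rfl
  | cons x xs ih =>
    rw [List.reverse_cons, pvLastValue_append, ih,
      pvLastVal_cons x xs k none,
      pvLastVal_elim xs k
        (if PySem.Dict.get? (PySem.Dict.mk x) "key" = some k then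
          some (PySem.Dict.getD (PySem.Dict.mk x) "value" "")
        else none)]
    cases h : pvLastVal xs k none with
    | some w => rfl
    | none =>
      by_cases hm : PySem.Dict.get? (PySem.Dict.mk x) "key" = some k
      · simp [pvLastValue, hm]
      · simp [pvLastValue, hm]

lemma pvA_fold (l : List (List (String × String))) (a b c : Option String) :
    l.foldl
      (fun d m =>
        if PySem.Dict.get? (PySem.Dict.mk m) "key" = some "_wcpdf_invoice_number" then
          d.insert "invoice_number" (some (PySem.Dict.getD (PySem.Dict.mk m) "value" ""))
        else if PySem.Dict.get? (PySem.Dict.mk m) "key" = some "_wcpdf_invoice_date_formatted" then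
          d.insert "invoice_date" (some (PySem.Dict.getD (PySem.Dict.mk m) "value" ""))
        else if PySem.Dict.get? (PySem.Dict.mk m) "key" = some "_order_number_formatted" then
          d.insert "order_number" (some (PySem.Dict.getD (PySem.Dict.mk m) "value" ""))
        else d)
      (PySem.Dict.mk [("invoice_number", a), ("invoice_date", b), ("order_number", c)])
    = PySem.Dict.mk
        [("invoice_number", (pvLastVal l "_wcpdf_invoice_number" none).elim a some),
         ("invoice_date", (pvLastVal l "_wcpdf_invoice_date_formatted" none).elim b some),
         ("order_number", (pvLastVal l "_order_number_formatted" none).elim c some)] := by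
  induction l generalizing a b c with
  | nil => simp [pvLastVal]
  | cons x xs ih =>
    rw [List.foldl_cons,
      pvLastVal_cons x xs "_wcpdf_invoice_number" none,
      pvLastVal_cons x xs "_wcpdf_invoice_date_formatted" none,
      pvLastVal_cons x xs "_order_number_formatted" none]
    by_cases h1 : PySem.Dict.get? (PySem.Dict.mk x) "key" = some "_wcpdf_invoice_number"
    · have h2 : ¬ PySem.Dict.get? (PySem.Dict.mk x) "key" = some "_wcpdf_invoice_date_formatted" := by
        rw [h1]; simp
      have h3 : ¬ PySem.Dict.get? (PySem.Dict.mk x) "key" = some "_order_number_formatted" := by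
        rw [h1]; simp
      rw [if_pos h1, if_pos h1, if_neg h2, if_neg h3]
      have hins : (PySem.Dict.mk [("invoice_number", a), ("invoice_date", b), ("order_number", c)]).insert
          "invoice_number" (some (PySem.Dict.getD (PySem.Dict.mk x) "value" ""))
          = PySem.Dict.mk [("invoice_number", some (PySem.Dict.getD (PySem.Dict.mk x) "value" "")),
                           ("invoice_date", b), ("order_number", c)] := rfl
      rw [hins, ih,
        pvLastVal_elim xs "_wcpdf_invoice_number" (some (PySem.Dict.getD (PySem.Dict.mk x) "value" ""))]
      cases pvLastVal xs "_wcpdf_invoice_number" none <;> rfl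
    · rw [if_neg h1, if_neg h1]
      by_cases h2 : PySem.Dict.get? (PySem.Dict.mk x) "key" = some "_wcpdf_invoice_date_formatted"
      · have h3 : ¬ PySem.Dict.get? (PySem.Dict.mk x) "key" = some "_order_number_formatted" := by
          rw [h2]; simp
        rw [if_pos h2, if_pos h2, if_neg h3]
        have hins : (PySem.Dict.mk [("invoice_number", a), ("invoice_date", b), ("order_number", c)]).insert
            "invoice_date" (some (PySem.Dict.getD (PySem.Dict.mk x) "value" ""))
            = PySem.Dict.mk [("invoice_number", a),
                             ("invoice_date", some (PySem.Dict.getD (PySem.Dict.mk x) "value" "")),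
                             ("order_number", c)] := rfl
        rw [hins, ih,
          pvLastVal_elim xs "_wcpdf_invoice_date_formatted" (some (PySem.Dict.getD (PySem.Dict.mk x) "value" ""))]
        cases pvLastVal xs "_wcpdf_invoice_date_formatted" none <;> rfl
      · rw [if_neg h2, if_neg h2]
        by_cases h3 : PySem.Dict.get? (PySem.Dict.mk x) "key" = some "_order_number_formatted"
        · rw [if_pos h3, if_pos h3]
          have hins : (PySem.Dict.mk [("invoice_number", a), ("invoice_date", b), ("order_number", c)]).insert
              "order_number" (some (PySem.Dict.getD (PySem.Dict.mk x) "value" ""))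
              = PySem.Dict.mk [("invoice_number", a), ("invoice_date", b),
                               ("order_number", some (PySem.Dict.getD (PySem.Dict.mk x) "value" ""))] := rfl
          rw [hins, ih,
            pvLastVal_elim xs "_order_number_formatted" (some (PySem.Dict.getD (PySem.Dict.mk x) "value" ""))]
          cases pvLastVal xs "_order_number_formatted" none <;> rfl
        · rw [if_neg h3, if_neg h3]
          exact ih a b c

-- ===== VERDICT (by name: the statement is the Claim_ definition above) =====
theorem get_invoice_details_spec : Claim_equal_get_invoice_details := by
  intro meta_data _
  unfold Spec_get_invoice_details get_invoice_details get_invoice_details_alt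
  rw [pvA_fold,
    pvLastValue_reverse meta_data "_wcpdf_invoice_number" (some ""),
    pvLastValue_reverse meta_data "_wcpdf_invoice_date_formatted" none,
    pvLastValue_reverse meta_data "_order_number_formatted" (some "")]
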